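-- pv_equiv track=rewrite | github.com/nishadhka/DevOps-hazard-modeling | rim2d/sdn/nile_2024/v24/analysis/bresenham_4connected_demo.py | bresenham_4connected
-- ===== SOURCE A (Python) =====
-- def bresenham_4connected(r0, c0, r1, c1):
--     """4-connected Bresenham — intermediate orthogonal cell at each diagonal step.
--
--     At every point where the standard algorithm would step both row and col
--     simultaneously (diagonal), this variant inserts one extra cell to break
--     the diagonal into two orthogonal steps:
--
--         if dr >= dc:  row step first  →  (r+sr, c)  then  (r+sr, c+sc)
--         else:         col step first  →  (r, c+sc)  then  (r+sr, c+sc)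
--
--     Every consecutive pair of output cells therefore shares an edge, making
--     the path traversable by 4-directional flow models (RIM2D, LISFLOOD-FP, …).
--     """
--     pts = []
--     dr = abs(r1-r0); dc = abs(c1-c0)
--     sr = 1 if r1 > r0 else -1
--     sc = 1 if c1 > c0 else -1
--     err = dr - dc
--     r, c = r0, c0
--     while True:
--         pts.append((r, c))
--         if r == r1 and c == c1:
--             break
--         e2 = 2 * err
--         step_r = e2 > -dc
--         step_c = e2 <  dr
--         if step_r and step_c:
--             # Diagonal step — insert intermediate orthogonal cell
--             if dr >= dc:
--                 pts.append((r + sr, c))   # row-first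
--             else:
--                 pts.append((r, c + sc))   # col-first
--             err -= dc; r += sr
--             err += dr; c += sc
--         elif step_r:
--             err -= dc; r += sr
--         else:
--             err += dr; c += sc
--     return pts
-- ===== SOURCE B (Python) =====
-- def bresenham_4connected(r0, c0, r1, c1):
--     """Closed-form variant: each major-axis index k maps directly to its
--     minor coordinate via floor((2*k*minor_delta + major_delta - 1) // (2*major_delta));
--     no error accumulator is carried, and the orthogonal intermediate is
--     emitted whenever the minor coordinate advances between k and k+1."""
--     dr = abs(r1 - r0); dc = abs(c1 - c0)
--     sr = 1 if r1 > r0 else -1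
--     sc = 1 if c1 > c0 else -1
--     if dr == 0 and dc == 0:
--         return [(r0, c0)]
--     pts = []
--     if dr >= dc:
--         minor = lambda k: (2 * k * dc + dr - 1) // (2 * dr)
--         for k in range(dr):
--             b = minor(k)
--             pts.append((r0 + sr * k, c0 + sc * b))
--             if minor(k + 1) > b:
--                 pts.append((r0 + sr * (k + 1), c0 + sc * b))
--     else:
--         minor = lambda k: (2 * k * dr + dc - 1) // (2 * dc)
--         for k in range(dc):
--             a = minor(k)
--             pts.append((r0 + sr * a, c0 + sc * k))
--             if minor(k + 1) > a:
--                 pts.append((r0 + sr * a, c0 + sc * (k + 1)))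
--     pts.append((r1, c1))
--     return pts
-- ===== Notes on version B (the rewrite author's own statement) =====
-- stated objective: alternative
-- what changed: B drops A's stateful error-accumulator loop entirely: it computes the minor coordinate at each major-axis index k by the closed-form floor((2*k*minor+major-1)//(2*major)) and emits the orthogonal intermediate whenever that value advances between k and k+1.
import Mathlib
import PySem

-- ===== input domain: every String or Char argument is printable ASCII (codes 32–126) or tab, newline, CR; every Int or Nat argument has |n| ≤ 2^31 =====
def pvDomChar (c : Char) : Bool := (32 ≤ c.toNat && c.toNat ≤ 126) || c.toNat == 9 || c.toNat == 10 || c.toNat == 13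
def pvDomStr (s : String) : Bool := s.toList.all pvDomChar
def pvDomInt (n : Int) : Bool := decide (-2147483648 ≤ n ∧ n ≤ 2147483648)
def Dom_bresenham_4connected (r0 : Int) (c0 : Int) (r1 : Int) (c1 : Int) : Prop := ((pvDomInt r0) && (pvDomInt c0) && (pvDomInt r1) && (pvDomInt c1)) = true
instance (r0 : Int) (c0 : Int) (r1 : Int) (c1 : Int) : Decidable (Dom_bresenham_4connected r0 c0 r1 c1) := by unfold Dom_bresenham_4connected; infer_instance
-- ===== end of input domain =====

-- B replaces A's error-accumulator Bresenham loop by a closed-form computation of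
-- the minor coordinate at every major-axis index (objective: alternative algorithm,
-- same cost).

-- ===== PORT A =====
-- A's while-loop: one step per iteration, inserting the orthogonal intermediate
-- inline at every diagonal step; made total with a fuel counter that is large
-- enough to never run out on any input.
def bresLoopA (r1 c1 dr dc sr sc : Int) : Nat → Int → Int → Int → List (Int × Int)
  | 0, r, c, _ => [(r, c)]   -- fuel guard only (never reached: fuel > number of iterations)
  | n + 1, r, c, err =>
    (r, c) ::
      (if r = r1 ∧ c = c1 then []
       else
         let e2 := 2 * err
         if e2 > -dc ∧ e2 < dr then
           (if dr ≥ dc then (r + sr, c) else (r, c + sc)) ::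
             bresLoopA r1 c1 dr dc sr sc n (r + sr) (c + sc) (err - dc + dr)
         else if e2 > -dc then
           bresLoopA r1 c1 dr dc sr sc n (r + sr) c (err - dc)
         else
           bresLoopA r1 c1 dr dc sr sc n r (c + sc) (err + dr))

def bresenham_4connected (r0 : Int) (c0 : Int) (r1 : Int) (c1 : Int) : List (Int × Int) :=
  let dr := |r1 - r0|
  let dc := |c1 - c0|
  let sr : Int := if r1 > r0 then 1 else -1
  let sc : Int := if c1 > c0 then 1 else -1
  bresLoopA r1 c1 dr dc sr sc ((dr + dc).toNat + 1) r0 c0 (dr - dc)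

-- ===== PORT B =====
-- Source B's `minor` lambda: minor coordinate offset at major-axis index k
-- (M = major delta, m = minor delta); Python's `//` is PySem.Int.floordiv.
def bresMinor (M m k : Int) : Int := PySem.Int.floordiv (2 * k * m + M - 1) (2 * M)

-- Source B's `for k in range(dr)` loop (row-major branch), one group per k.
def bRowLoop (r0 c0 sr sc dr dc : Int) : Nat → Int → List (Int × Int)
  | 0, _ => []
  | n + 1, k =>
    let b := bresMinor dr dc k
    ((r0 + sr * k, c0 + sc * b) ::
       (if bresMinor dr dc (k + 1) > b then [(r0 + sr * (k + 1), c0 + sc * b)] else []))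
      ++ bRowLoop r0 c0 sr sc dr dc n (k + 1)

-- Source B's `for k in range(dc)` loop (column-major branch).
def bColLoop (r0 c0 sr sc dr dc : Int) : Nat → Int → List (Int × Int)
  | 0, _ => []
  | n + 1, k =>
    let a := bresMinor dc dr k
    ((r0 + sr * a, c0 + sc * k) ::
       (if bresMinor dc dr (k + 1) > a then [(r0 + sr * a, c0 + sc * (k + 1))] else []))
      ++ bColLoop r0 c0 sr sc dr dc n (k + 1)

def bresenham_4connected_alt (r0 : Int) (c0 : Int) (r1 : Int) (c1 : Int) : List (Int × Int) :=
  let dr := |r1 - r0|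
  let dc := |c1 - c0|
  let sr : Int := if r1 > r0 then 1 else -1
  let sc : Int := if c1 > c0 then 1 else -1
  if dr = 0 ∧ dc = 0 then [(r0, c0)]
  else if dr ≥ dc then
    bRowLoop r0 c0 sr sc dr dc dr.toNat 0 ++ [(r1, c1)]
  else
    bColLoop r0 c0 sr sc dr dc dc.toNat 0 ++ [(r1, c1)]

-- ===== PRECONDITION & SPEC =====
def Spec_bresenham_4connected (r0 : Int) (c0 : Int) (r1 : Int) (c1 : Int) (out : List (Int × Int)) : Prop := out = bresenham_4connected_alt r0 c0 r1 c1
instance (r0 : Int) (c0 : Int) (r1 : Int) (c1 : Int) (out : List (Int × Int)) : Decidable (Spec_bresenham_4connected r0 c0 r1 c1 out) := by unfold Spec_bresenham_4connected; infer_instance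

-- ===== CLAIM (what is proved, stated in full; the proofs are below) =====
def Claim_equal_bresenham_4connected : Prop := ∀ (r0 : Int) (c0 : Int) (r1 : Int) (c1 : Int), Dom_bresenham_4connected r0 c0 r1 c1 → Spec_bresenham_4connected r0 c0 r1 c1 (bresenham_4connected r0 c0 r1 c1)

-- ===== LEMMAS AND PROOFS =====

-- characterization of bresMinor as the unique q with q*(2M) ≤ 2km+M-1 < (q+1)*(2M)
lemma bresMinor_bounds (M m k : Int) (hM : 0 < M) :
    bresMinor M m k * (2 * M) ≤ 2 * k * m + M - 1 ∧
      2 * k * m + M - 1 < (bresMinor M m k + 1) * (2 * M) :=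
  (PySem.Int.floordiv_eq_iff_of_pos (by omega)).mp rfl

lemma bresMinor_zero (M m : Int) (hM : 0 < M) : bresMinor M m 0 = 0 := by
  unfold bresMinor
  rw [PySem.Int.floordiv_eq_iff_of_pos (by omega)]
  constructor <;> nlinarith

lemma bresMinor_top (M m : Int) (hM : 0 < M) : bresMinor M m M = m := by
  unfold bresMinor
  rw [PySem.Int.floordiv_eq_iff_of_pos (by omega)]
  constructor <;> nlinarith

-- the minor offset advances by 0 or 1 between consecutive major indices
lemma bresMinor_step (M m k : Int) (hM : 0 < M) (hm : 0 ≤ m) (hmM : m ≤ M) :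
    bresMinor M m (k + 1) = bresMinor M m k ∨
      bresMinor M m (k + 1) = bresMinor M m k + 1 := by
  obtain ⟨h1, h2⟩ := bresMinor_bounds M m k hM
  obtain ⟨h3, h4⟩ := bresMinor_bounds M m (k + 1) hM
  set b := bresMinor M m k
  set b' := bresMinor M m (k + 1)
  have hge : b ≤ b' := by nlinarith
  have hlt : b' < b + 2 := by nlinarith
  omega

-- the generic invariant step for the major axis: with b = bresMinor M m k and
-- err = M - m - k*m + b*M, the wrong-axis-only step never fires, and the
-- diagonal fires exactly when the minor offset advances.
lemma bresMinor_major_step (M m k : Int) (hM : 0 < M) (hm : 0 ≤ m) (hmM : m ≤ M) :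
    -m < 2 * (M - m - k * m + bresMinor M m k * M) ∧
      (2 * (M - m - k * m + bresMinor M m k * M) < M ↔
        bresMinor M m (k + 1) = bresMinor M m k + 1) := by
  obtain ⟨h1, h2⟩ := bresMinor_bounds M m k hM
  obtain ⟨h3, h4⟩ := bresMinor_bounds M m (k + 1) hM
  have hstep := bresMinor_step M m k hM hm hmM
  constructor
  · by_cases hmeq : m = M
    · subst hmeq
      have hb1 : bresMinor m m k ≤ k := by nlinarith
      have hb2 : k ≤ bresMinor m m k := by nlinarith
      nlinarith
    · have hmlt : m < M := lt_of_le_of_ne hmM hmeq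
      nlinarith
  · constructor
    · intro hlt
      rcases hstep with h | h
      · exfalso; rw [h] at h3 h4; nlinarith
      · exact h
    · intro h
      rw [h] at h3 h4; nlinarith

-- row-major case (dr ≥ dc, dr > 0): A's loop from the state reached after k
-- major steps equals B's remaining row loop plus the final endpoint.
lemma rowLoop_eq (r0 c0 r1 c1 dr dc sr sc : Int)
    (hdr : 0 < dr) (hdc : 0 ≤ dc) (hdd : dc ≤ dr)
    (hsr : sr = 1 ∨ sr = -1)
    (hr1 : r1 = r0 + sr * dr) (hc1 : c1 = c0 + sc * dc) :
    ∀ (fuel : Nat) (k : Int), 0 ≤ k → k ≤ dr → (dr - k).toNat < fuel →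
      bresLoopA r1 c1 dr dc sr sc fuel (r0 + sr * k) (c0 + sc * bresMinor dr dc k)
          (dr - dc - k * dc + bresMinor dr dc k * dr)
        = bRowLoop r0 c0 sr sc dr dc (dr - k).toNat k ++ [(r1, c1)] := by
  intro fuel
  induction fuel with
  | zero => intro k _ _ h; omega
  | succ n ih =>
    intro k hk0 hkd hfuel
    by_cases hend : k = dr
    · have hb : bresMinor dr dc k = dc := by rw [hend]; exact bresMinor_top dr dc hdr
      have hnat0 : (dr - k).toNat = 0 := by omega
      have hre : r0 + sr * k = r1 := by rw [hr1, hend]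
      have hce : c0 + sc * bresMinor dr dc k = c1 := by rw [hc1, hb]
      rw [hnat0]
      simp [bresLoopA, bRowLoop, hre, hce]
    · have hklt : k < dr := by omega
      have hne : ¬(r0 + sr * k = r1 ∧ c0 + sc * bresMinor dr dc k = c1) := by
        rintro ⟨h, -⟩; rw [hr1] at h; rcases hsr with h' | h' <;> subst h' <;> omega
      obtain ⟨hstepr, hdiag⟩ := bresMinor_major_step dr dc k hdr hdc hdd
      have hnat1 : (dr - k).toNat = (dr - (k + 1)).toNat + 1 := by omega
      have hnat2 : (dr - (k + 1)).toNat < n := by omega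
      by_cases hc : 2 * (dr - dc - k * dc + bresMinor dr dc k * dr) < dr
      · -- diagonal step
        have hb' : bresMinor dr dc (k + 1) = bresMinor dr dc k + 1 := hdiag.mp hc
        have hrec := ih (k + 1) (by omega) (by omega) hnat2
        rw [hb'] at hrec
        have harg : ∀ x : Int, r0 + sr * x + sr = r0 + sr * (x + 1) := by intro x; ring
        have hargc : ∀ x : Int, c0 + sc * x + sc = c0 + sc * (x + 1) := by intro x; ring
        have herr : dr - dc - k * dc + bresMinor dr dc k * dr - dc + dr
            = dr - dc - (k + 1) * dc + (bresMinor dr dc k + 1) * dr := by ring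
        have hdcond : 2 * (dr - dc - k * dc + bresMinor dr dc k * dr) > -dc ∧
            2 * (dr - dc - k * dc + bresMinor dr dc k * dr) < dr := ⟨hstepr, hc⟩
        rw [hnat1]
        simp only [bresLoopA, bRowLoop]
        rw [if_neg hne, if_pos hdcond, if_pos (show dr ≥ dc from hdd)]
        rw [harg k, hargc (bresMinor dr dc k), herr, hrec,
          if_pos (show bresMinor dr dc (k + 1) > bresMinor dr dc k by rw [hb']; omega)]
        simp
      · -- row-only step
        have hb' : bresMinor dr dc (k + 1) = bresMinor dr dc k := by
          rcases bresMinor_step dr dc k hdr hdc hdd with h | h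
          · exact h
          · exact absurd (hdiag.mpr h) hc
        have hrec := ih (k + 1) (by omega) (by omega) hnat2
        rw [hb'] at hrec
        have harg : r0 + sr * k + sr = r0 + sr * (k + 1) := by ring
        have herr : dr - dc - k * dc + bresMinor dr dc k * dr - dc
            = dr - dc - (k + 1) * dc + bresMinor dr dc k * dr := by ring
        rw [hnat1]
        have hcond : ¬(2 * (dr - dc - k * dc + bresMinor dr dc k * dr) > -dc ∧
            2 * (dr - dc - k * dc + bresMinor dr dc k * dr) < dr) := by
          rintro ⟨-, h⟩; exact hc h
        simp only [bresLoopA, bRowLoop]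
        rw [if_neg hne, if_neg hcond, if_pos hstepr]
        rw [harg, herr, hrec,
          if_neg (show ¬ bresMinor dr dc (k + 1) > bresMinor dr dc k by rw [hb']; omega)]
        simp

-- column-major case (dr < dc): symmetric.
lemma colLoop_eq (r0 c0 r1 c1 dr dc sr sc : Int)
    (hdc : 0 < dc) (hdr : 0 ≤ dr) (hdd : dr < dc)
    (hsc : sc = 1 ∨ sc = -1)
    (hr1 : r1 = r0 + sr * dr) (hc1 : c1 = c0 + sc * dc) :
    ∀ (fuel : Nat) (k : Int), 0 ≤ k → k ≤ dc → (dc - k).toNat < fuel →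
      bresLoopA r1 c1 dr dc sr sc fuel (r0 + sr * bresMinor dc dr k) (c0 + sc * k)
          (dr - dc + k * dr - bresMinor dc dr k * dc)
        = bColLoop r0 c0 sr sc dr dc (dc - k).toNat k ++ [(r1, c1)] := by
  intro fuel
  induction fuel with
  | zero => intro k _ _ h; omega
  | succ n ih =>
    intro k hk0 hkd hfuel
    by_cases hend : k = dc
    · have hb : bresMinor dc dr k = dr := by rw [hend]; exact bresMinor_top dc dr hdc
      have hnat0 : (dc - k).toNat = 0 := by omega
      have hre : r0 + sr * bresMinor dc dr k = r1 := by rw [hr1, hb]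
      have hce : c0 + sc * k = c1 := by rw [hc1, hend]
      rw [hnat0]
      simp [bresLoopA, bColLoop, hre, hce]
    · have hklt : k < dc := by omega
      have hne : ¬(r0 + sr * bresMinor dc dr k = r1 ∧ c0 + sc * k = c1) := by
        rintro ⟨-, h⟩; rw [hc1] at h; rcases hsc with h' | h' <;> subst h' <;> omega
      obtain ⟨hstepc', hdiag⟩ := bresMinor_major_step dc dr k hdc hdr hdd.le
      -- translate to A's err form: err = dr - dc + k*dr - a*dc
      have hstepc : 2 * (dr - dc + k * dr - bresMinor dc dr k * dc) < dr := by
        linarith [hstepc']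
      have hdiag2 : -dc < 2 * (dr - dc + k * dr - bresMinor dc dr k * dc) ↔
          bresMinor dc dr (k + 1) = bresMinor dc dr k + 1 := by
        constructor
        · intro h; apply hdiag.mp; linarith
        · intro h; have := hdiag.mpr h; linarith
      have hnat1 : (dc - k).toNat = (dc - (k + 1)).toNat + 1 := by omega
      have hnat2 : (dc - (k + 1)).toNat < n := by omega
      have hnodiagkind : ¬ dr ≥ dc := by omega
      by_cases hr : 2 * (dr - dc + k * dr - bresMinor dc dr k * dc) > -dc
      · -- diagonal step
        have hb' : bresMinor dc dr (k + 1) = bresMinor dc dr k + 1 := hdiag2.mp hr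
        have hrec := ih (k + 1) (by omega) (by omega) hnat2
        rw [hb'] at hrec
        have harg : r0 + sr * bresMinor dc dr k + sr = r0 + sr * (bresMinor dc dr k + 1) := by
          ring
        have hargc : c0 + sc * k + sc = c0 + sc * (k + 1) := by ring
        have herr : dr - dc + k * dr - bresMinor dc dr k * dc - dc + dr
            = dr - dc + (k + 1) * dr - (bresMinor dc dr k + 1) * dc := by ring
        have hdcond : 2 * (dr - dc + k * dr - bresMinor dc dr k * dc) > -dc ∧
            2 * (dr - dc + k * dr - bresMinor dc dr k * dc) < dr := ⟨hr, hstepc⟩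
        rw [hnat1]
        simp only [bresLoopA, bColLoop]
        rw [if_neg hne, if_pos hdcond, if_neg hnodiagkind]
        rw [harg, hargc, herr, hrec,
          if_pos (show bresMinor dc dr (k + 1) > bresMinor dc dr k by rw [hb']; omega)]
        simp
      · -- col-only step
        have hb' : bresMinor dc dr (k + 1) = bresMinor dc dr k := by
          rcases bresMinor_step dc dr k hdc hdr hdd.le with h | h
          · exact h
          · exact absurd (hdiag2.mpr h) hr
        have hrec := ih (k + 1) (by omega) (by omega) hnat2
        rw [hb'] at hrec
        have hargc : c0 + sc * k + sc = c0 + sc * (k + 1) := by ring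
        have herr : dr - dc + k * dr - bresMinor dc dr k * dc + dr
            = dr - dc + (k + 1) * dr - bresMinor dc dr k * dc := by ring
        rw [hnat1]
        have hcond : ¬(2 * (dr - dc + k * dr - bresMinor dc dr k * dc) > -dc ∧
            2 * (dr - dc + k * dr - bresMinor dc dr k * dc) < dr) := by
          rintro ⟨h, -⟩; exact hr h
        simp only [bresLoopA, bColLoop]
        rw [if_neg hne, if_neg hcond, if_neg hr]
        rw [hargc, herr, hrec,
          if_neg (show ¬ bresMinor dc dr (k + 1) > bresMinor dc dr k by rw [hb']; omega)]
        simp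

-- ===== VERDICT (by name: the statement is the Claim_ definition above) =====
theorem bresenham_4connected_spec : Claim_equal_bresenham_4connected := by
  intro r0 c0 r1 c1 _
  unfold Spec_bresenham_4connected bresenham_4connected bresenham_4connected_alt
  set dr := |r1 - r0| with hdr
  set dc := |c1 - c0| with hdc
  set sr : Int := if r1 > r0 then 1 else -1 with hsr
  set sc : Int := if c1 > c0 then 1 else -1 with hsc
  have hdr0 : 0 ≤ dr := abs_nonneg _
  have hdc0 : 0 ≤ dc := abs_nonneg _
  have hsr' : sr = 1 ∨ sr = -1 := by rw [hsr]; split <;> simp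
  have hsc' : sc = 1 ∨ sc = -1 := by rw [hsc]; split <;> simp
  have hr1 : r1 = r0 + sr * dr := by
    rw [hsr, hdr]; rcases abs_cases (r1 - r0) with ⟨h, h'⟩ | ⟨h, h'⟩ <;> split <;> omega
  have hc1 : c1 = c0 + sc * dc := by
    rw [hsc, hdc]; rcases abs_cases (c1 - c0) with ⟨h, h'⟩ | ⟨h, h'⟩ <;> split <;> omega
  by_cases h0 : dr = 0 ∧ dc = 0
  · obtain ⟨h1, h2⟩ := h0
    have : r1 = r0 ∧ c1 = c0 := by
      constructor <;> [rw [hr1, h1]; rw [hc1, h2]] <;> ring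
    simp [bresLoopA, h1, h2, this.1.symm, this.2.symm]
  · by_cases hbr : dr ≥ dc
    · have hdrpos : 0 < dr := by omega
      have h := rowLoop_eq r0 c0 r1 c1 dr dc sr sc hdrpos hdc0 hbr hsr' hr1 hc1
        ((dr + dc).toNat + 1) 0 le_rfl hdr0 (by omega)
      rw [bresMinor_zero dr dc hdrpos] at h
      simp only [mul_zero, add_zero, zero_mul, sub_zero] at h
      rw [if_neg h0, if_pos hbr, ← h]
    · have hdcpos : 0 < dc := by omega
      have h := colLoop_eq r0 c0 r1 c1 dr dc sr sc hdcpos hdr0 (by omega) hsc' hr1 hc1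
        ((dr + dc).toNat + 1) 0 le_rfl hdc0 (by omega)
      rw [bresMinor_zero dc dr hdcpos] at h
      simp only [mul_zero, add_zero, zero_mul, sub_zero] at h
      rw [if_neg h0, if_neg hbr, ← h]
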